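-- pv_equiv track=rewrite | github.com/pfichefet/Sokoban | sokoban.py | blockCorner
-- ===== SOURCE A (Python) =====
-- directions = [ [-1, 0], [1, 0], [0, -1], [0, 1] ]
--
-- def blockCorner(grid,ligne,colonne,sizeMap,goal):
-- 	count=0
-- 	lr=0
-- 	ud=0
-- 	for col,line in directions:
-- 		newL=ligne+line
-- 		newC=colonne+col
-- 		what=whatIsHere(grid,newL,newC)
--
-- 		if (('.',ligne,colonne) not in goal):
-- 		 	if(what=='wall' or not (inBounds(grid,(newL,newC),sizeMap))):
-- 		 		count+=1
-- 		 		if(line!=0):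
-- 		 			ud+=1
-- 		 		elif(col!=0):
-- 		 			lr+=1
-- 		else:
-- 			return False
-- 	if count>2:
-- 		return True
-- 	elif count==2:
-- 		if (ud==2 or lr==2):
-- 			return False
-- 		else:
-- 			return True
-- 	else:
-- 		return False
--
-- def whatIsHere(grid,ligne,colonne):
-- 	for e in grid:
-- 		if ligne==e[1] and colonne==e[2]:
-- 			if e[0] == '$':
-- 				return 'box'
-- 			elif e[0] =='#':
-- 				return 'wall'
-- 	return 'nothing'
--
-- def inBounds(grid, pos,sizeMap):
-- 	return 0 <= pos[0] and pos[0] < sizeMap[0] and 0 <= pos[1] and pos[1] < sizeMap[1]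
-- ===== SOURCE B (Python) =====
-- def blockCorner(grid, ligne, colonne, sizeMap, goal):
--     if ('.', ligne, colonne) in goal:
--         return False
--     # one pass over the grid: route each '$'/'#' entry to the neighbour slot it
--     # occupies (first entry per cell wins, as in the original's scan order)
--     up = down = left = right = None
--     for sym, l, c in grid:
--         if sym == '$' or sym == '#':
--             if c == colonne and l == ligne - 1:
--                 up = up or sym
--             elif c == colonne and l == ligne + 1:
--                 down = down or sym
--             elif l == ligne and c == colonne - 1:
--                 left = left or sym
--             elif l == ligne and c == colonne + 1:
--                 right = right or sym
--     h, w = sizeMap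
--     def inside(l, c):
--         return 0 <= l < h and 0 <= c < w
--     vert = up == '#' or down == '#' or not inside(ligne - 1, colonne) or not inside(ligne + 1, colonne)
--     horiz = left == '#' or right == '#' or not inside(ligne, colonne - 1) or not inside(ligne, colonne + 1)
--     return vert and horiz
-- ===== Notes on version B (the rewrite author's own statement) =====
-- stated objective: alternative
-- what changed: B inverts the traversal: instead of looping over the 4 directions and rescanning the whole grid for each (whatIsHere) while counting with count/ud/lr thresholds, B scans the grid once, routing each '$'/'#' entry to one of four neighbour slots (first entry per cell wins), and decides with a closed boolean formula: stuck iff some vertical and some horizontal neighbour is a wall or out of bounds.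
import Mathlib
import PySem

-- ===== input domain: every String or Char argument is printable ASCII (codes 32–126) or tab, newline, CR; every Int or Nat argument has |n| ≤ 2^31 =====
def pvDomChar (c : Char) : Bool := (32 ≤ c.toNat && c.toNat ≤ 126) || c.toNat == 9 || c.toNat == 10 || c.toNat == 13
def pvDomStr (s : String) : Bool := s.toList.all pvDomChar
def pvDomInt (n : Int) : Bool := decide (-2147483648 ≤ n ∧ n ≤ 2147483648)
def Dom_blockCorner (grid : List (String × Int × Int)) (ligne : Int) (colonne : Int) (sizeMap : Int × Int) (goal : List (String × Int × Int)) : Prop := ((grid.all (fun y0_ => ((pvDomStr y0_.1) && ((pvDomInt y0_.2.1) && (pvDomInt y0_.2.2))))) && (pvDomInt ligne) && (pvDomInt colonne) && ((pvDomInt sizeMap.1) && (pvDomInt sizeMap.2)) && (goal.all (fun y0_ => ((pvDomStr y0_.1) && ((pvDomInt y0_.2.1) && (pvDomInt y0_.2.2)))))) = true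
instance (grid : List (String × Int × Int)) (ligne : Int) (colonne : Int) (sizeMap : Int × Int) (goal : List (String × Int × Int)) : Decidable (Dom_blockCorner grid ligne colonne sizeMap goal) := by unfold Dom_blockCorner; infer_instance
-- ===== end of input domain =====

-- B inverts the traversal: one pass over the grid routing each '$'/'#' entry to one of
-- four neighbour slots, then a closed boolean formula replaces A's count/ud/lr logic.

-- ===== PORT A =====
def pvDirections : List (Int × Int) := [(-1, 0), (1, 0), (0, -1), (0, 1)]

def whatIsHere (grid : List (String × Int × Int)) (ligne colonne : Int) : String :=
  match grid with
  | [] => "nothing"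
  | e :: rest =>
    if ligne == e.2.1 && colonne == e.2.2 then
      if e.1 == "$" then "box"
      else if e.1 == "#" then "wall"
      else whatIsHere rest ligne colonne
    else whatIsHere rest ligne colonne

def inBounds (grid : List (String × Int × Int)) (pos : Int × Int) (sizeMap : Int × Int) : Bool :=
  decide (0 ≤ pos.1) && decide (pos.1 < sizeMap.1) && decide (0 ≤ pos.2) && decide (pos.2 < sizeMap.2)

-- the for-loop of A, with the early `return False` modelled as `none`
def blockCornerLoop (grid : List (String × Int × Int)) (ligne colonne : Int)
    (sizeMap : Int × Int) (goal : List (String × Int × Int)) :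
    List (Int × Int) → Int → Int → Int → Option (Int × Int × Int)
  | [], count, lr, ud => some (count, lr, ud)
  | (col, line) :: rest, count, lr, ud =>
      let newL := ligne + line
      let newC := colonne + col
      let what := whatIsHere grid newL newC
      if ¬ ((".", ligne, colonne) ∈ goal) then
        if what == "wall" || !(inBounds grid (newL, newC) sizeMap) then
          let count := count + 1
          if line != 0 then blockCornerLoop grid ligne colonne sizeMap goal rest count lr (ud + 1)
          else if col != 0 then blockCornerLoop grid ligne colonne sizeMap goal rest count (lr + 1) ud
          else blockCornerLoop grid ligne colonne sizeMap goal rest count lr ud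
        else blockCornerLoop grid ligne colonne sizeMap goal rest count lr ud
      else none

def blockCorner (grid : List (String × Int × Int)) (ligne : Int) (colonne : Int) (sizeMap : Int × Int) (goal : List (String × Int × Int)) : Bool :=
  match blockCornerLoop grid ligne colonne sizeMap goal pvDirections 0 0 0 with
  | none => false
  | some (count, lr, ud) =>
      if count > 2 then true
      else if count == 2 then
        if ud == 2 || lr == 2 then false else true
      else false

-- ===== PORT B =====
-- B's single pass: four Option-accumulators, first '$'/'#' entry per neighbour cell wins
def neighSyms (ligne colonne : Int) :
    List (String × Int × Int) →
    Option String × Option String × Option String × Option String →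
    Option String × Option String × Option String × Option String
  | [], s => s
  | (sym, l, c) :: rest, (up, down, left, right) =>
      if sym == "$" || sym == "#" then
        if c == colonne && l == ligne - 1 then
          neighSyms ligne colonne rest (up.or (some sym), down, left, right)
        else if c == colonne && l == ligne + 1 then
          neighSyms ligne colonne rest (up, down.or (some sym), left, right)
        else if l == ligne && c == colonne - 1 then
          neighSyms ligne colonne rest (up, down, left.or (some sym), right)
        else if l == ligne && c == colonne + 1 then
          neighSyms ligne colonne rest (up, down, left, right.or (some sym))
        else neighSyms ligne colonne rest (up, down, left, right)
      else neighSyms ligne colonne rest (up, down, left, right)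

def insideB (h w l c : Int) : Bool :=
  decide (0 ≤ l) && decide (l < h) && decide (0 ≤ c) && decide (c < w)

def blockCorner_alt (grid : List (String × Int × Int)) (ligne : Int) (colonne : Int) (sizeMap : Int × Int) (goal : List (String × Int × Int)) : Bool :=
  if (".", ligne, colonne) ∈ goal then false
  else
    match neighSyms ligne colonne grid (none, none, none, none) with
    | (up, down, left, right) =>
      let h := sizeMap.1
      let w := sizeMap.2
      let vert := up == some "#" || down == some "#"
        || !insideB h w (ligne - 1) colonne || !insideB h w (ligne + 1) colonne
      let horiz := left == some "#" || right == some "#"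
        || !insideB h w ligne (colonne - 1) || !insideB h w ligne (colonne + 1)
      vert && horiz

-- ===== PRECONDITION & SPEC =====
def Spec_blockCorner (grid : List (String × Int × Int)) (ligne : Int) (colonne : Int) (sizeMap : Int × Int) (goal : List (String × Int × Int)) (out : Bool) : Prop := out = blockCorner_alt grid ligne colonne sizeMap goal
instance (grid : List (String × Int × Int)) (ligne : Int) (colonne : Int) (sizeMap : Int × Int) (goal : List (String × Int × Int)) (out : Bool) : Decidable (Spec_blockCorner grid ligne colonne sizeMap goal out) := by unfold Spec_blockCorner; infer_instance

-- ===== CLAIM (what is proved, stated in full; the proofs are below) =====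
def Claim_equal_blockCorner : Prop := ∀ (grid : List (String × Int × Int)) (ligne : Int) (colonne : Int) (sizeMap : Int × Int) (goal : List (String × Int × Int)), Dom_blockCorner grid ligne colonne sizeMap goal → Spec_blockCorner grid ligne colonne sizeMap goal (blockCorner grid ligne colonne sizeMap goal)

-- ===== LEMMAS AND PROOFS =====

-- first '$'/'#' entry at a cell: the common characterisation of both sides
def firstSym : List (String × Int × Int) → Int × Int → Option String
  | [], _ => none
  | (sym, l, c) :: rest, k =>
      if (sym == "$" || sym == "#") && ((l, c) == k) then some sym else firstSym rest k

theorem whatIsHere_wall (grid : List (String × Int × Int)) (l c : Int) :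
    (whatIsHere grid l c == "wall") = (firstSym grid (l, c) == some "#") := by
  induction grid with
  | nil => simp [whatIsHere, firstSym]
  | cons e rest ih =>
      obtain ⟨sym, el, ec⟩ := e
      simp only [whatIsHere, firstSym]
      by_cases hl : el = l
      · subst hl
        by_cases hc : ec = c
        · subst hc
          by_cases hs : sym = "$"
          · subst hs; simp
          · by_cases hw : sym = "#"
            · subst hw; simp
            · simp [hs, hw, ih]
        · simp [hc, Ne.symm hc, ih]
      · simp [hl, Ne.symm hl, ih]

theorem neighSyms_eq (ligne colonne : Int) (grid : List (String × Int × Int))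
    (u d l r : Option String) :
    neighSyms ligne colonne grid (u, d, l, r) =
      (u.or (firstSym grid (ligne - 1, colonne)),
       d.or (firstSym grid (ligne + 1, colonne)),
       l.or (firstSym grid (ligne, colonne - 1)),
       r.or (firstSym grid (ligne, colonne + 1))) := by
  induction grid generalizing u d l r with
  | nil => simp [neighSyms, firstSym]
  | cons e rest ih =>
      obtain ⟨sym, el, ec⟩ := e
      by_cases hs : (sym == "$" || sym == "#") = true
      · simp only [neighSyms, firstSym, hs, if_true, Bool.true_and,
          Bool.and_eq_true, beq_iff_eq, Prod.mk.injEq]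
        split_ifs <;> rw [ih] <;>
          simp only [Prod.mk.injEq, Option.or_assoc, Option.some_or] <;>
          (exfalso; omega)
      · have hs' : (sym == "$" || sym == "#") = false := by
          revert hs; cases (sym == "$" || sym == "#") <;> simp
        simp [neighSyms, firstSym, hs', ih]

-- ===== VERDICT (by name: the statement is the Claim_ definition above) =====
theorem blockCorner_spec : Claim_equal_blockCorner := by
  intro grid ligne colonne sizeMap goal _
  unfold Spec_blockCorner blockCorner blockCorner_alt
  by_cases hg : (".", ligne, colonne) ∈ goal
  · simp [pvDirections, blockCornerLoop, hg]
  · have hsub : ∀ x : Int, x + -1 = x - 1 := fun x => by ring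
    have hz : ∀ x : Int, x + 0 = x := fun x => by ring
    simp only [pvDirections, blockCornerLoop, hg, not_false_eq_true, if_true, if_false,
      hsub, hz, neighSyms_eq, whatIsHere_wall, inBounds, insideB, Option.none_or]
    generalize (firstSym grid (ligne - 1, colonne) == some "#") = wU
    generalize (firstSym grid (ligne + 1, colonne) == some "#") = wD
    generalize (firstSym grid (ligne, colonne - 1) == some "#") = wL
    generalize (firstSym grid (ligne, colonne + 1) == some "#") = wR
    generalize (decide (0 ≤ ligne - 1) && decide (ligne - 1 < sizeMap.1) &&
      decide (0 ≤ colonne) && decide (colonne < sizeMap.2)) = iU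
    generalize (decide (0 ≤ ligne + 1) && decide (ligne + 1 < sizeMap.1) &&
      decide (0 ≤ colonne) && decide (colonne < sizeMap.2)) = iD
    generalize (decide (0 ≤ ligne) && decide (ligne < sizeMap.1) &&
      decide (0 ≤ colonne - 1) && decide (colonne - 1 < sizeMap.2)) = iL
    generalize (decide (0 ≤ ligne) && decide (ligne < sizeMap.1) &&
      decide (0 ≤ colonne + 1) && decide (colonne + 1 < sizeMap.2)) = iR
    cases wU <;> cases wD <;> cases wL <;> cases wR <;>
      cases iU <;> cases iD <;> cases iL <;> cases iR <;> decide
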